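-- pv_equiv track=rewrite | github.com/dmitridzuk/first_class | python/dis_math/lab4/bigramm3.0.py | huffman_bigram_encoding
-- ===== SOURCE A (Python) =====
-- import heapq
-- from functools import total_ordering
--
-- @total_ordering
-- class HuffmanNode:
--     def __init__(self, char, freq, left=None, right=None):
--         self.char = char
--         self.freq = freq
--         self.left = left
--         self.right = right
--
--     # Для сравнения узлов при сортировке
--     def __lt__(self, other):
--         return self.freq < other.freq
--
--     def __eq__(self, other):
--         return self.freq == other.freq
--
-- def build_huffman_tree(freq_dict):
--     """Построение дерева Хаффмана"""
--     heap = []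
--     for char, freq in freq_dict.items():
--         heapq.heappush(heap, HuffmanNode(char, freq))
--
--     while len(heap) > 1:
--         left = heapq.heappop(heap)
--         right = heapq.heappop(heap)
--         merged = HuffmanNode(None, left.freq + right.freq, left, right)
--         heapq.heappush(heap, merged)
--
--     return heap[0] if heap else None
--
-- def build_huffman_codes(node, prefix="", code_dict=None):
--     """Построение таблицы кодов Хаффмана"""
--     if code_dict is None:
--         code_dict = {}
--
--     if node.char is not None:
--         code_dict[node.char] = prefix
--     else:
--         build_huffman_codes(node.left, prefix + "0", code_dict)
--         build_huffman_codes(node.right, prefix + "1", code_dict)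
--
--     return code_dict
--
-- def huffman_bigram_encoding(text, bigram_freq):
--     """Вычисление общего количества бит для кодирования Хаффмана биграмм"""
--     if len(bigram_freq) == 0:
--         return 0
--
--     # Создаем дерево Хаффмана для биграмм
--     tree = build_huffman_tree(bigram_freq)
--     if tree is None:
--         return 0
--
--     codes = build_huffman_codes(tree)
--
--     # Разбиваем текст на биграммы
--     bigrams = [text[i:i + 2] for i in range(len(text) - 1)]
--
--     total_bits = 0
--     for bigram in bigrams:
--         total_bits += len(codes[bigram])
--
--     return total_bits
-- ===== SOURCE B (Python) =====
-- import heapq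
-- from functools import total_ordering
--
-- @total_ordering
-- class WeightedFreq:
--     """Heap item: compares exactly like the tree nodes (by freq only)."""
--     def __init__(self, freq, weight):
--         self.freq = freq
--         self.weight = weight
--
--     def __lt__(self, other):
--         return self.freq < other.freq
--
--     def __eq__(self, other):
--         return self.freq == other.freq
--
-- def huffman_bigram_encoding(text, bigram_freq):
--     """Total Huffman bits without building the tree or the code table:
--     total = sum over merge steps of the merged text-occurrence weight."""
--     if len(bigram_freq) == 0:
--         return 0
--
--     # occurrences of each bigram in the text
--     counts = {}
--     for i in range(len(text) - 1):
--         bg = text[i:i + 2]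
--         counts[bg] = counts.get(bg, 0) + 1
--
--     heap = []
--     for bg, freq in bigram_freq.items():
--         heapq.heappush(heap, WeightedFreq(freq, counts.get(bg, 0)))
--
--     total = 0
--     while len(heap) > 1:
--         a = heapq.heappop(heap)
--         b = heapq.heappop(heap)
--         w = a.weight + b.weight
--         total += w
--         heapq.heappush(heap, WeightedFreq(a.freq + b.freq, w))
--
--     return total
-- ===== Notes on version B (the rewrite author's own statement) =====
-- stated objective: alternative
-- what changed: B never builds the Huffman tree or the code table: it counts the text's bigrams once, pushes (freq, count) pairs onto the heap, and accumulates the total during the merging itself, adding each merged pair's combined occurrence count to the running total (sum over merge steps of merged subtree weight = sum over occurrences of code length).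
import Mathlib
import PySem

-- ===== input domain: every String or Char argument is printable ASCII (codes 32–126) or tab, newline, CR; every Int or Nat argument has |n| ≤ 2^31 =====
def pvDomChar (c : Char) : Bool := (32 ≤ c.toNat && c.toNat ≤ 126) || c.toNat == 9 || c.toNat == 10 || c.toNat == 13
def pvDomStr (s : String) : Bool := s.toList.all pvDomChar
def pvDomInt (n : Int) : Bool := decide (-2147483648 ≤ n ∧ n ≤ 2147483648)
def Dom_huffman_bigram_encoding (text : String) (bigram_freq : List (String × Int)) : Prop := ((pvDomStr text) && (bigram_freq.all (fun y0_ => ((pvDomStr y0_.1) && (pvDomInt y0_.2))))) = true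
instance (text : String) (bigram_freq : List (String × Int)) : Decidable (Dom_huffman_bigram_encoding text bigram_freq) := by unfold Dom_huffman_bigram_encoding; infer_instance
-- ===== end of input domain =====

-- B computes the total during the heap merging itself (sum of merged occurrence weights),
-- never building the Huffman tree or the code table; same heapq tie-breaking, so equal on Pre_.

-- ===== PORT A =====
-- The Python dict argument is received as its association list; 'dict(pairs)' semantics
-- (first position, last value) is PySem.Dict.update Dict.empty pairs, shared by both ports.

-- HuffmanNode: leaf carries the bigram string, internal node char=None carries children.
inductive PvHNode where
  | leaf : String → Int → PvHNode
  | node : Int → PvHNode → PvHNode → PvHNode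
deriving Repr, DecidableEq, Inhabited

def PvHNode.freq : PvHNode → Int
  | .leaf _ f => f
  | .node f _ _ => f

-- heapq._siftdown(heap, startpos, pos) with newitem = heap[pos]; comparison is '<' on freq only,
-- exactly HuffmanNode.__lt__.  (getD default is unreachable: all indices are in range.)
def pvSiftdown (heap : Array PvHNode) (startpos pos : Nat) (newitem : PvHNode) :
    Array PvHNode :=
  if _h : startpos < pos then
    let parentpos := (pos - 1) / 2
    let parent := heap.getD parentpos default
    if newitem.freq < parent.freq then
      pvSiftdown (heap.set! pos parent) startpos parentpos newitem
    else
      heap.set! pos newitem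
  else
    heap.set! pos newitem
termination_by pos
decreasing_by
  have := Nat.div_le_self (pos - 1) 2
  omega

-- heapq._siftup(heap, pos): endpos = len(heap); move the smaller child up, then siftdown.
def pvSiftup (heap : Array PvHNode) (startpos pos endpos : Nat) (newitem : PvHNode) :
    Array PvHNode :=
  let childpos := 2 * pos + 1
  if h : childpos < endpos then
    let rightpos := childpos + 1
    let childpos :=
      -- 'rightpos < endpos and not heap[childpos] < heap[rightpos]'
      if rightpos < endpos ∧
          ¬ ((heap.getD childpos default).freq < (heap.getD rightpos default).freq) then
        rightpos
      else childpos
    let heap := heap.set! pos (heap.getD childpos default)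
    pvSiftup heap startpos childpos endpos newitem
  else
    pvSiftdown (heap.set! pos newitem) startpos pos newitem
termination_by endpos - pos
decreasing_by
  split <;> omega

-- heapq.heappush: append, then siftdown from the last index.
def pvHeappush (heap : Array PvHNode) (item : PvHNode) : Array PvHNode :=
  pvSiftdown (heap.push item) 0 heap.size item

-- heapq.heappop: none = IndexError on an empty heap (unreachable in the callers below).
def pvHeappop (heap : Array PvHNode) : Option (PvHNode × Array PvHNode) :=
  match heap.back? with
  | none => none
  | some lastelt =>
    let heap := heap.pop
    if h : 0 < heap.size then
      let returnitem := heap[0]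
      some (returnitem, pvSiftup (heap.set! 0 lastelt) 0 0 heap.size lastelt)
    else
      some (lastelt, heap)

-- 'while len(heap) > 1': each iteration shrinks the heap by one, so heap.size is enough fuel
-- (the fuel only makes the recursion structural; it never changes the computation).
def pvBuildLoop : Nat → Array PvHNode → Array PvHNode
  | 0, heap => heap
  | fuel + 1, heap =>
    if 1 < heap.size then
      match pvHeappop heap with
      | none => heap  -- unreachable: size > 1
      | some (left, h1) =>
        match pvHeappop h1 with
        | none => h1  -- unreachable
        | some (right, h2) =>
          pvBuildLoop fuel
            (pvHeappush h2 (PvHNode.node (left.freq + right.freq) left right))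
    else heap

def pvBuildHuffmanTree (freq_dict : PySem.Dict String Int) : Option PvHNode :=
  let heap := freq_dict.items.foldl (fun h p => pvHeappush h (PvHNode.leaf p.1 p.2)) #[]
  let heap := pvBuildLoop heap.size heap
  heap[0]?  -- 'heap[0] if heap else None'

-- build_huffman_codes; the code strings are kept as List Char ('prefix + "0"' = prefix ++ ['0']),
-- exact since only append and len are ever applied to them.
def pvBuildHuffmanCodes : PvHNode → List Char → PySem.Dict String (List Char) →
    PySem.Dict String (List Char)
  | .leaf c _, prefx, d => d.insert c prefx
  | .node _ l r, prefx, d =>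
      pvBuildHuffmanCodes r (prefx ++ ['1']) (pvBuildHuffmanCodes l (prefx ++ ['0']) d)

def huffman_bigram_encoding (text : String) (bigram_freq : List (String × Int)) : Int :=
  let d := PySem.Dict.update (PySem.Dict.empty) bigram_freq
  if d.size = 0 then 0
  else
    match pvBuildHuffmanTree d with
    | none => 0
    | some tree =>
      let codes := pvBuildHuffmanCodes tree [] PySem.Dict.empty
      let bigrams := (PySem.List.pyRange 0 (PySem.Str.len text - 1) 1).map
        (fun i => PySem.Str.slice text (some i) (some (i + 2)))
      -- codes[bigram]: the getD default is unreachable under Pre_ (KeyError excluded there)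
      bigrams.foldl (fun acc bg => acc + ((codes.getD bg []).length : Int)) 0

-- ===== PORT B =====
-- B's heap items are WeightedFreq(freq, weight) pairs: .1 = freq (the ONLY comparison key,
-- like HuffmanNode.__lt__), .2 = the bigram's occurrence count in the text.  The heapq
-- primitives are transliterated again for this item type.

def pvWSiftdown (heap : Array (Int × Int)) (startpos pos : Nat) (newitem : Int × Int) :
    Array (Int × Int) :=
  if _h : startpos < pos then
    let parentpos := (pos - 1) / 2
    let parent := heap.getD parentpos default
    if newitem.1 < parent.1 then
      pvWSiftdown (heap.set! pos parent) startpos parentpos newitem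
    else
      heap.set! pos newitem
  else
    heap.set! pos newitem
termination_by pos
decreasing_by
  have := Nat.div_le_self (pos - 1) 2
  omega

def pvWSiftup (heap : Array (Int × Int)) (startpos pos endpos : Nat) (newitem : Int × Int) :
    Array (Int × Int) :=
  let childpos := 2 * pos + 1
  if h : childpos < endpos then
    let rightpos := childpos + 1
    let childpos :=
      if rightpos < endpos ∧
          ¬ ((heap.getD childpos default).1 < (heap.getD rightpos default).1) then
        rightpos
      else childpos
    let heap := heap.set! pos (heap.getD childpos default)
    pvWSiftup heap startpos childpos endpos newitem
  else
    pvWSiftdown (heap.set! pos newitem) startpos pos newitem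
termination_by endpos - pos
decreasing_by
  split <;> omega

def pvWPush (heap : Array (Int × Int)) (item : Int × Int) : Array (Int × Int) :=
  pvWSiftdown (heap.push item) 0 heap.size item

def pvWPop (heap : Array (Int × Int)) : Option ((Int × Int) × Array (Int × Int)) :=
  match heap.back? with
  | none => none
  | some lastelt =>
    let heap := heap.pop
    if h : 0 < heap.size then
      let returnitem := heap[0]
      some (returnitem, pvWSiftup (heap.set! 0 lastelt) 0 0 heap.size lastelt)
    else
      some (lastelt, heap)

-- 'while len(heap) > 1: a = pop; b = pop; w = a.weight + b.weight; total += w; push (a.freq+b.freq, w)'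
def pvWMergeLoop : Nat → Array (Int × Int) → Int → Int
  | 0, _, total => total
  | fuel + 1, heap, total =>
    if 1 < heap.size then
      match pvWPop heap with
      | none => total  -- unreachable: size > 1
      | some (a, h1) =>
        match pvWPop h1 with
        | none => total  -- unreachable
        | some (b, h2) =>
          pvWMergeLoop fuel (pvWPush h2 (a.1 + b.1, a.2 + b.2)) (total + (a.2 + b.2))
    else total

def huffman_bigram_encoding_alt (text : String) (bigram_freq : List (String × Int)) : Int :=
  let d := PySem.Dict.update (PySem.Dict.empty) bigram_freq
  if d.size = 0 then 0
  else
    -- counts[bg] = counts.get(bg, 0) + 1, one pass over the text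
    let counts := (PySem.List.pyRange 0 (PySem.Str.len text - 1) 1).foldl
      (fun c i =>
        let bg := PySem.Str.slice text (some i) (some (i + 2))
        c.insert bg (c.getD bg 0 + 1))
      (PySem.Dict.empty : PySem.Dict String Int)
    -- push WeightedFreq(freq, counts.get(bg, 0)) for each dict entry
    let heap := d.items.foldl (fun h p => pvWPush h (p.2, counts.getD p.1 0)) #[]
    pvWMergeLoop heap.size heap 0

-- ===== PRECONDITION & SPEC =====
-- Pre_ excludes exactly the inputs where A raises KeyError: a nonempty frequency dict whose
-- key set misses some bigram of the text (the Huffman code table's keys are the dict's keys).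
def Pre_huffman_bigram_encoding (text : String) (bigram_freq : List (String × Int)) : Prop :=
  bigram_freq = [] ∨
    ∀ i ∈ PySem.List.pyRange 0 (PySem.Str.len text - 1) 1,
      PySem.Str.slice text (some i) (some (i + 2)) ∈ bigram_freq.map Prod.fst
instance (text : String) (bigram_freq : List (String × Int)) :
    Decidable (Pre_huffman_bigram_encoding text bigram_freq) := by
  unfold Pre_huffman_bigram_encoding; infer_instance

def pvWitness_huffman_bigram_encoding : String × (List (String × Int)) :=
  ("abab", [("ab", 2), ("ba", 1)])

def Spec_huffman_bigram_encoding (text : String) (bigram_freq : List (String × Int)) (out : Int) : Prop := out = huffman_bigram_encoding_alt text bigram_freq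
instance (text : String) (bigram_freq : List (String × Int)) (out : Int) : Decidable (Spec_huffman_bigram_encoding text bigram_freq out) := by unfold Spec_huffman_bigram_encoding; infer_instance

-- ===== CLAIM (what is proved, stated in full; the proofs are below) =====
def Claim_equal_huffman_bigram_encoding : Prop := ∀ (text : String) (bigram_freq : List (String × Int)), Dom_huffman_bigram_encoding text bigram_freq → Pre_huffman_bigram_encoding text bigram_freq → Spec_huffman_bigram_encoding text bigram_freq (huffman_bigram_encoding text bigram_freq)

-- ===== LEMMAS AND PROOFS =====

-- leaves of a tree, left to right
def pvLeaves : PvHNode → List String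
  | .leaf c _ => [c]
  | .node _ l r => pvLeaves l ++ pvLeaves r

-- leaves with their depths
def pvLeavesD : PvHNode → List (String × Nat)
  | .leaf c _ => [(c, 0)]
  | .node _ l r =>
      (pvLeavesD l).map (fun p => (p.1, p.2 + 1)) ++ (pvLeavesD r).map (fun p => (p.1, p.2 + 1))

-- total w-weight of a tree's leaves
def pvW (w : String → Int) : PvHNode → Int
  | .leaf c _ => w c
  | .node _ l r => pvW w l + pvW w r

-- Σ over leaves of w(leaf) * depth(leaf), as the sum over merge nodes of merged weights
def pvC (w : String → Int) : PvHNode → Int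
  | .leaf _ _ => 0
  | .node _ l r => pvC w l + pvC w r + (pvW w l + pvW w r)

-- the simulation map from A's heap items to B's
def pvPhi (w : String → Int) (n : PvHNode) : Int × Int := (n.freq, pvW w n)

def pvCsum (w : String → Int) (heap : Array PvHNode) : Int :=
  (heap.toList.map (pvC w)).sum

theorem pv_map_getD (heap : Array PvHNode) (w : String → Int) (i : Nat) (h : i < heap.size)
    (d : Int × Int) (d' : PvHNode) :
    (heap.map (pvPhi w)).getD i d = pvPhi w (heap.getD i d') := by
  simp [Array.getD, h]

-- replacing position p by l[pp] and then position pp by x is, as a multiset, replacing p by x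
theorem pv_set_set_perm {α} [DecidableEq α] (l : List α) (x : α) (p pp : Nat)
    (hpp : pp < l.length) (hp : p < l.length) (hne : pp ≠ p) :
    List.Perm ((l.set p (l[pp])).set pp x) (l.set p x) := by
  rw [List.perm_iff_count]; intro a
  have hlen : pp < (l.set p (l[pp])).length := by simpa using hpp
  have hget : (l.set p (l[pp]))[pp] = l[pp] := List.getElem_set_ne (h := by omega) hlen
  rw [List.count_set hlen, List.count_set hp, List.count_set hp, hget]
  have h1 : (l[p] == a) = true → 1 ≤ l.count a := by
    intro h; exact List.one_le_count_iff.mpr (by rw [← eq_of_beq h]; exact l.getElem_mem hp)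
  have h2 : (l[pp] == a) = true → 1 ≤ l.count a := by
    intro h; exact List.one_le_count_iff.mpr (by rw [← eq_of_beq h]; exact l.getElem_mem hpp)
  split_ifs <;> simp_all


theorem pv_sd_sim (w : String → Int) (heap : Array PvHNode) (s pos : Nat) (x : PvHNode)
    (h : pos < heap.size) :
    pvWSiftdown (heap.map (pvPhi w)) s pos (pvPhi w x) = (pvSiftdown heap s pos x).map (pvPhi w) := by
  fun_induction pvSiftdown heap s pos x
  next heap pos hlt ppos parent hcmp ih =>
    have hpp : (pos - 1) / 2 < heap.size := by have := Nat.div_le_self (pos - 1) 2; omega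
    rw [pvWSiftdown, dif_pos hlt]
    simp only [pv_map_getD (h := hpp) (d' := default)]
    rw [if_pos (show (pvPhi w x).1 < (pvPhi w (heap.getD ((pos - 1) / 2) default)).1 from hcmp)]
    have hset : (heap.map (pvPhi w)).set! pos (pvPhi w (heap.getD ((pos - 1) / 2) default)) =
        (heap.set! pos (heap.getD ((pos - 1) / 2) default)).map (pvPhi w) := by
      simp [Array.set!]
    rw [hset]
    exact ih (by simpa using hpp)
  next heap pos hlt ppos parent hcmp =>
    have hpp : (pos - 1) / 2 < heap.size := by have := Nat.div_le_self (pos - 1) 2; omega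
    rw [pvWSiftdown, dif_pos hlt]
    simp only [pv_map_getD (h := hpp) (d' := default)]
    rw [if_neg (show ¬ (pvPhi w x).1 < (pvPhi w (heap.getD ((pos - 1) / 2) default)).1 from hcmp)]
    simp [Array.set!]
  next heap pos hlt =>
    rw [pvWSiftdown, dif_neg hlt]
    simp [Array.set!]

theorem pv_map_getD_freq (heap : Array PvHNode) (w : String → Int) (i : Nat) :
    ((heap.map (pvPhi w)).getD i default).1 = (heap.getD i default).freq := by
  by_cases h : i < heap.size
  · simp [Array.getD, h, pvPhi]
  · simp only [Array.getD, Array.size_map, dif_neg h]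
    rfl

theorem pv_su_sim (w : String → Int) (heap : Array PvHNode) (s pos e : Nat) (x : PvHNode)
    (hpos : pos < e) (he : e ≤ heap.size) :
    pvWSiftup (heap.map (pvPhi w)) s pos e (pvPhi w x) = (pvSiftup heap s pos e x).map (pvPhi w) := by
  fun_induction pvSiftup heap s pos e x
  next heap pos c hce r cp heap2 ih =>
    simp only [cp, heap2, r, c] at ih ⊢
    rw [pvWSiftup, dif_pos hce]
    simp only [pv_map_getD_freq]
    by_cases hch : (2*pos+1+1 < e ∧
        ¬ (heap.getD (2*pos+1) default).freq < (heap.getD (2*pos+1+1) default).freq)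
    · simp only [dif_pos hch, if_pos hch] at ih ⊢
      have hr : 2*pos+1+1 < heap.size := lt_of_lt_of_le hch.1 he
      rw [pv_map_getD (h := hr) (d' := default)]
      have hset : (heap.map (pvPhi w)).set! pos (pvPhi w (heap.getD (2*pos+1+1) default)) =
          (heap.set! pos (heap.getD (2*pos+1+1) default)).map (pvPhi w) := by
        simp [Array.set!]
      rw [hset]
      exact ih hch.1 (by simpa using he)
    · simp only [dif_neg hch, if_neg hch] at ih ⊢
      have hc : 2*pos+1 < heap.size := lt_of_lt_of_le hce he
      rw [pv_map_getD (h := hc) (d' := default)]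
      have hset : (heap.map (pvPhi w)).set! pos (pvPhi w (heap.getD (2*pos+1) default)) =
          (heap.set! pos (heap.getD (2*pos+1) default)).map (pvPhi w) := by
        simp [Array.set!]
      rw [hset]
      exact ih hce (by simpa using he)
  next heap pos c hce =>
    simp only [c] at *
    rw [pvWSiftup, dif_neg hce]
    have hset : (heap.map (pvPhi w)).set! pos (pvPhi w x) = (heap.set! pos x).map (pvPhi w) := by
      simp [Array.set!]
    rw [hset]
    exact pv_sd_sim w (heap.set! pos x) s pos x (by simpa using lt_of_lt_of_le hpos he)

theorem pv_push_sim (w : String → Int) (heap : Array PvHNode) (x : PvHNode) :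
    pvWPush (heap.map (pvPhi w)) (pvPhi w x) = (pvHeappush heap x).map (pvPhi w) := by
  rw [pvWPush, pvHeappush]
  have hpush : (heap.map (pvPhi w)).push (pvPhi w x) = (heap.push x).map (pvPhi w) := by
    simp
  rw [hpush, Array.size_map]
  exact pv_sd_sim w (heap.push x) 0 heap.size x (by simp)

theorem pv_pop_sim (w : String → Int) (heap : Array PvHNode) :
    pvWPop (heap.map (pvPhi w)) =
      (pvHeappop heap).map (fun p => (pvPhi w p.1, p.2.map (pvPhi w))) := by
  rw [pvWPop, pvHeappop, Array.back?_map]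
  cases hb : heap.back? with
  | none => rfl
  | some lastelt =>
    simp only [Option.map_some]
    have hpop : (heap.map (pvPhi w)).pop = heap.pop.map (pvPhi w) := (Array.map_pop).symm
    rw [hpop]
    simp only [Array.size_map]
    by_cases h : 0 < heap.pop.size
    · rw [dif_pos h, dif_pos h]
      simp only [Option.map_some]
      have hget : (heap.pop.map (pvPhi w))[0]'(by simpa using h) = pvPhi w (heap.pop[0]'h) := by
        simp
      have hset : (heap.pop.map (pvPhi w)).set! 0 (pvPhi w lastelt) =
          (heap.pop.set! 0 lastelt).map (pvPhi w) := by
        simp [Array.set!]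
      rw [hget, hset]
      rw [pv_su_sim w (heap.pop.set! 0 lastelt) 0 0 heap.pop.size lastelt h (by simp [Array.set!])]
    · rw [dif_neg h, dif_neg h]
      rfl
theorem pv_getD_toList (heap : Array PvHNode) (i : Nat) (h : i < heap.size) (d : PvHNode) :
    heap.getD i d = heap.toList[i]'(by simpa using h) := by
  simp [Array.getD, h]

theorem pv_set_toList (heap : Array PvHNode) (i : Nat) (x : PvHNode) :
    (heap.set! i x).toList = heap.toList.set i x := by
  simp [Array.set!]

theorem pv_sd_perm (heap : Array PvHNode) (s pos : Nat) (x : PvHNode) (h : pos < heap.size) :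
    List.Perm (pvSiftdown heap s pos x).toList (heap.toList.set pos x) := by
  fun_induction pvSiftdown heap s pos x
  next heap pos hlt ppos parent hcmp ih =>
    simp only [ppos, parent] at *
    have hpp : (pos - 1) / 2 < heap.size := by have := Nat.div_le_self (pos - 1) 2; omega
    have hlen : pos < heap.toList.length := by simpa using h
    have hplen : (pos - 1) / 2 < heap.toList.length := by simpa using hpp
    refine (ih (by simpa using hpp)).trans ?_
    rw [pv_set_toList, pv_getD_toList heap _ hpp]
    exact pv_set_set_perm heap.toList x pos ((pos - 1) / 2) hplen hlen (by omega)
  next heap pos hlt ppos parent hcmp =>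
    rw [pv_set_toList]
  next heap pos hlt =>
    rw [pv_set_toList]

theorem pv_su_perm (heap : Array PvHNode) (s pos e : Nat) (x : PvHNode)
    (hpos : pos < e) (he : e ≤ heap.size) :
    List.Perm (pvSiftup heap s pos e x).toList (heap.toList.set pos x) := by
  fun_induction pvSiftup heap s pos e x
  next heap pos c hce r cp heap2 ih =>
    simp only [cp, heap2, r, c] at *
    have hlen : pos < heap.toList.length := by simpa using lt_of_lt_of_le hpos he
    by_cases hch : (2*pos+1+1 < e ∧
        ¬ (heap.getD (2*pos+1) default).freq < (heap.getD (2*pos+1+1) default).freq)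
    · simp only [dif_pos hch] at ih ⊢
      have hcps : 2*pos+1+1 < heap.size := lt_of_lt_of_le hch.1 he
      have hclen : 2*pos+1+1 < heap.toList.length := by simpa using hcps
      refine (ih hch.1 (by simpa [Array.set!] using he)).trans ?_
      rw [pv_set_toList, pv_getD_toList heap _ hcps]
      exact pv_set_set_perm heap.toList x pos (2*pos+1+1) hclen hlen (by omega)
    · simp only [dif_neg hch] at ih ⊢
      have hcps : 2*pos+1 < heap.size := lt_of_lt_of_le hce he
      have hclen : 2*pos+1 < heap.toList.length := by simpa using hcps
      refine (ih hce (by simpa [Array.set!] using he)).trans ?_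
      rw [pv_set_toList, pv_getD_toList heap _ hcps]
      exact pv_set_set_perm heap.toList x pos (2*pos+1) hclen hlen (by omega)
  next heap pos c hce =>
    refine (pv_sd_perm _ s pos x (by simpa [Array.set!] using lt_of_lt_of_le hpos he)).trans ?_
    rw [pv_set_toList, List.set_set]
theorem pv_push_perm (heap : Array PvHNode) (x : PvHNode) :
    List.Perm (pvHeappush heap x).toList (x :: heap.toList) := by
  rw [pvHeappush]
  refine (pv_sd_perm (heap.push x) 0 heap.size x (by simp)).trans ?_
  rw [Array.toList_push]
  have hlen : heap.size < (heap.toList ++ [x]).length := by simp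
  have hget : (heap.toList ++ [x])[heap.size]'hlen = x := by
    simp [List.getElem_append_right]
  have hsame : (heap.toList ++ [x]).set heap.size x = heap.toList ++ [x] := by
    conv_rhs => rw [← List.set_getElem_self hlen]
    rw [hget]
  rw [hsame]
  exact List.perm_append_singleton x heap.toList

theorem pv_pop_some (heap : Array PvHNode) (h : heap.size ≠ 0) :
    ∃ x rest, pvHeappop heap = some (x, rest) := by
  rw [pvHeappop]
  cases hb : heap.back? with
  | none => exact absurd (by simpa [Array.isEmpty_iff_size_eq_zero] using
      (Array.back?_eq_none_iff).mp hb) h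
  | some lastelt =>
    dsimp only
    by_cases h0 : 0 < heap.pop.size
    · exact ⟨_, _, by rw [dif_pos h0]⟩
    · exact ⟨_, _, by rw [dif_neg h0]⟩

theorem pv_pop_perm (heap : Array PvHNode) (x : PvHNode) (rest : Array PvHNode)
    (h : pvHeappop heap = some (x, rest)) :
    List.Perm heap.toList (x :: rest.toList) := by
  rw [pvHeappop] at h
  cases hb : heap.back? with
  | none => rw [hb] at h; exact absurd h (by simp)
  | some lastelt =>
    rw [hb] at h
    dsimp only at h
    have hlast : heap.toList.getLast? = some lastelt := by
      rw [← hb]; exact Array.getLast?_toList heap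
    have hlist : heap.toList = heap.pop.toList ++ [lastelt] := by
      rw [Array.toList_pop]
      exact (List.dropLast_append_getLast? lastelt hlast).symm
    by_cases h0 : 0 < heap.pop.size
    · rw [dif_pos h0] at h
      injection h with h'
      injection h' with hx hrest
      subst hx; subst hrest
      have hperm := pv_su_perm (heap.pop.set! 0 lastelt) 0 0 heap.pop.size lastelt h0
        (by simp [Array.set!])
      rw [pv_set_toList, List.set_set] at hperm
      rw [hlist]
      have hlen0 : 0 < heap.pop.toList.length := by
        simp only [Array.length_toList]; exact h0
      obtain ⟨a0, tl, htl⟩ := List.exists_cons_of_ne_nil (List.ne_nil_of_length_pos hlen0)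
      have hget0 : heap.pop[0]'h0 = a0 := by
        have h2 : heap.pop.toList[0]'(by rw [htl]; simp) = a0 := by
          simp only [htl, List.getElem_cons_zero]
        simpa only [Array.getElem_toList] using h2
      refine List.Perm.trans ?_ (List.Perm.cons _ hperm.symm)
      rw [htl, hget0]
      simp only [List.set_cons_zero, List.cons_append]
      exact List.Perm.cons a0 (List.perm_append_singleton lastelt tl)
    · rw [dif_neg h0] at h
      injection h with h'
      injection h' with hx hrest
      subst hx; subst hrest
      have hnil : heap.pop.toList = [] := List.eq_nil_of_length_eq_zero (by simpa using (by omega : heap.pop.size = 0))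
      rw [hlist, hnil]
      exact List.Perm.refl _
theorem pv_pop_size (heap : Array PvHNode) (x : PvHNode) (rest : Array PvHNode)
    (h : pvHeappop heap = some (x, rest)) : rest.size + 1 = heap.size := by
  have := (pv_pop_perm heap x rest h).length_eq
  simp only [Array.length_toList, List.length_cons] at this
  omega

theorem pv_push_size (heap : Array PvHNode) (x : PvHNode) :
    (pvHeappush heap x).size = heap.size + 1 := by
  have := (pv_push_perm heap x).length_eq
  simp only [Array.length_toList, List.length_cons] at this
  omega

theorem pv_bl_size (fuel : Nat) (heap : Array PvHNode) (h0 : 0 < heap.size)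
    (hf : heap.size ≤ fuel + 1) : (pvBuildLoop fuel heap).size = 1 := by
  induction fuel generalizing heap with
  | zero => rw [pvBuildLoop]; omega
  | succ fuel ih =>
    rw [pvBuildLoop]
    by_cases h1 : 1 < heap.size
    · rw [if_pos h1]
      obtain ⟨l, h1a, hp1⟩ := pv_pop_some heap (by omega)
      have hs1 := pv_pop_size heap l h1a hp1
      rw [hp1]
      dsimp only
      obtain ⟨r, h2a, hp2⟩ := pv_pop_some h1a (by omega)
      have hs2 := pv_pop_size h1a r h2a hp2
      rw [hp2]
      dsimp only
      have hps := pv_push_size h2a (PvHNode.node (l.freq + r.freq) l r)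
      exact ih _ (by omega) (by omega)
    · rw [if_neg h1]; omega

theorem pv_bl_leaves (fuel : Nat) (heap : Array PvHNode) :
    List.Perm ((pvBuildLoop fuel heap).toList.flatMap pvLeaves) (heap.toList.flatMap pvLeaves) := by
  induction fuel generalizing heap with
  | zero => rw [pvBuildLoop]
  | succ fuel ih =>
    rw [pvBuildLoop]
    by_cases h1 : 1 < heap.size
    · rw [if_pos h1]
      obtain ⟨l, h1a, hp1⟩ := pv_pop_some heap (by omega)
      have hs1 := pv_pop_size heap l h1a hp1
      rw [hp1]
      dsimp only
      obtain ⟨r, h2a, hp2⟩ := pv_pop_some h1a (by omega)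
      rw [hp2]
      dsimp only
      refine (ih _).trans ?_
      have hpushp := (pv_push_perm h2a (PvHNode.node (l.freq + r.freq) l r)).flatMap_right pvLeaves
      refine hpushp.trans ?_
      have hpop1 := (pv_pop_perm heap l h1a hp1).flatMap_right pvLeaves
      have hpop2 := (pv_pop_perm h1a r h2a hp2).flatMap_right pvLeaves
      have h2 : List.Perm (pvLeaves r ++ h2a.toList.flatMap pvLeaves)
          (h1a.toList.flatMap pvLeaves) := by
        simpa [List.flatMap_cons] using hpop2.symm
      have h1' : List.Perm (pvLeaves l ++ h1a.toList.flatMap pvLeaves)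
          (heap.toList.flatMap pvLeaves) := by
        simpa [List.flatMap_cons] using hpop1.symm
      simp only [List.flatMap_cons, pvLeaves, List.append_assoc]
      exact (List.Perm.append_left _ h2).trans h1'
    · rw [if_neg h1]
theorem pv_loop_sim (w : String → Int) (fuel : Nat) (heap : Array PvHNode) (total : Int) :
    pvWMergeLoop fuel (heap.map (pvPhi w)) total =
      total + pvCsum w (pvBuildLoop fuel heap) - pvCsum w heap := by
  induction fuel generalizing heap total with
  | zero => rw [pvWMergeLoop, pvBuildLoop]; ring
  | succ fuel ih =>
    rw [pvWMergeLoop, pvBuildLoop, Array.size_map]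
    by_cases h1 : 1 < heap.size
    · rw [if_pos h1, if_pos h1]
      obtain ⟨l, h1a, hp1⟩ := pv_pop_some heap (by omega)
      have hs1 := pv_pop_size heap l h1a hp1
      rw [hp1, pv_pop_sim w heap, hp1]
      simp only [Option.map_some]
      obtain ⟨r, h2a, hp2⟩ := pv_pop_some h1a (by omega)
      rw [hp2, pv_pop_sim w h1a, hp2]
      simp only [Option.map_some]
      have hpair : ((pvPhi w l).1 + (pvPhi w r).1, (pvPhi w l).2 + (pvPhi w r).2) =
          pvPhi w (PvHNode.node (l.freq + r.freq) l r) := rfl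
      rw [hpair, pv_push_sim w h2a (PvHNode.node (l.freq + r.freq) l r)]
      rw [ih]
      -- bookkeeping on Csum
      have hcs_push : pvCsum w (pvHeappush h2a (PvHNode.node (l.freq + r.freq) l r)) =
          pvC w (PvHNode.node (l.freq + r.freq) l r) + pvCsum w h2a := by
        unfold pvCsum
        rw [((pv_push_perm h2a _).map (pvC w)).sum_eq]
        simp
      have hcs1 : pvCsum w heap = pvC w l + pvCsum w h1a := by
        unfold pvCsum
        rw [((pv_pop_perm heap l h1a hp1).map (pvC w)).sum_eq]
        simp
      have hcs2 : pvCsum w h1a = pvC w r + pvCsum w h2a := by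
        unfold pvCsum
        rw [((pv_pop_perm h1a r h2a hp2).map (pvC w)).sum_eq]
        simp
      have hCnode : pvC w (PvHNode.node (l.freq + r.freq) l r) =
          pvC w l + pvC w r + (pvW w l + pvW w r) := rfl
      have hphi2 : (pvPhi w l).2 = pvW w l := rfl
      have hphi2r : (pvPhi w r).2 = pvW w r := rfl
      rw [hphi2, hphi2r, hcs_push, hcs1, hcs2, hCnode]
      ring
    · rw [if_neg h1, if_neg h1]
      ring
theorem pv_init_sim (w : String → Int) (l : List (String × Int)) (h : Array PvHNode) :
    (l.foldl (fun h p => pvHeappush h (PvHNode.leaf p.1 p.2)) h).map (pvPhi w) =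
      l.foldl (fun h p => pvWPush h (p.2, w p.1)) (h.map (pvPhi w)) := by
  induction l generalizing h with
  | nil => rfl
  | cons p l ih =>
    simp only [List.foldl_cons]
    rw [ih]
    congr 1
    rw [show ((p.2 : Int), w p.1) = pvPhi w (PvHNode.leaf p.1 p.2) from rfl, pv_push_sim]

theorem pv_init_perm (l : List (String × Int)) (h : Array PvHNode) :
    List.Perm (l.foldl (fun h p => pvHeappush h (PvHNode.leaf p.1 p.2)) h).toList
      (h.toList ++ l.map (fun p => PvHNode.leaf p.1 p.2)) := by
  induction l generalizing h with
  | nil => simp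
  | cons p l ih =>
    simp only [List.foldl_cons, List.map_cons]
    refine (ih _).trans ?_
    refine (List.Perm.append_right _ (pv_push_perm h (PvHNode.leaf p.1 p.2))).trans ?_
    simp only [List.cons_append]
    exact List.perm_middle.symm
theorem pv_leavesD_fst (t : PvHNode) : (pvLeavesD t).map Prod.fst = pvLeaves t := by
  induction t with
  | leaf c f => rfl
  | node f l r ihl ihr =>
    simp only [pvLeavesD, pvLeaves, List.map_append, List.map_map, ← ihl, ← ihr]
    rfl

theorem pv_mem_leaves_of_mem_leavesD (t : PvHNode) (c : String) (k : Nat)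
    (h : (c, k) ∈ pvLeavesD t) : c ∈ pvLeaves t := by
  rw [← pv_leavesD_fst]
  exact List.mem_map_of_mem h

theorem pv_codes_unchanged (t : PvHNode) (pre : List Char) (d : PySem.Dict String (List Char))
    (c : String) (hc : c ∉ pvLeaves t) :
    (pvBuildHuffmanCodes t pre d).get? c = d.get? c := by
  induction t generalizing pre d with
  | leaf c' f =>
    simp only [pvLeaves, List.mem_singleton] at hc
    rw [pvBuildHuffmanCodes]
    exact PySem.Dict.get?_insert_of_ne d pre hc
  | node f l r ihl ihr =>
    simp only [pvLeaves, List.mem_append] at hc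
    rw [pvBuildHuffmanCodes]
    rw [ihr _ _ (fun h => hc (Or.inr h)), ihl _ _ (fun h => hc (Or.inl h))]

theorem pv_codes_len (t : PvHNode) (pre : List Char) (d : PySem.Dict String (List Char))
    (c : String) (k : Nat) (hnd : (pvLeaves t).Nodup) (hm : (c, k) ∈ pvLeavesD t) :
    ((pvBuildHuffmanCodes t pre d).getD c []).length = pre.length + k := by
  induction t generalizing pre d k with
  | leaf c' f =>
    simp only [pvLeavesD, List.mem_singleton, Prod.mk.injEq] at hm
    obtain ⟨hc, hk⟩ := hm
    subst hc; subst hk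
    rw [pvBuildHuffmanCodes, PySem.Dict.getD_insert_self]
    simp
  | node f l r ihl ihr =>
    simp only [pvLeaves, List.nodup_append] at hnd
    rw [pvBuildHuffmanCodes]
    simp only [pvLeavesD, List.mem_append, List.mem_map] at hm
    rcases hm with ⟨⟨c', k'⟩, hm, hEq⟩ | ⟨⟨c', k'⟩, hm, hEq⟩
    · -- left leaf: the right-hand pass never touches c
      injection hEq with h1 h2
      subst h1; subst h2
      have hcl : c' ∈ pvLeaves l := pv_mem_leaves_of_mem_leavesD l c' k' hm
      have hcr : c' ∉ pvLeaves r := fun h => hnd.2.2 c' hcl c' h rfl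
      have hun : (pvBuildHuffmanCodes r (pre ++ ['1'])
            (pvBuildHuffmanCodes l (pre ++ ['0']) d)).getD c' [] =
          (pvBuildHuffmanCodes l (pre ++ ['0']) d).getD c' [] := by
        rw [PySem.Dict.getD_eq_get?_getD, PySem.Dict.getD_eq_get?_getD,
          pv_codes_unchanged r (pre ++ ['1']) _ c' hcr]
      rw [hun, ihl (pre ++ ['0']) d k' hnd.1 hm]
      simp
      omega
    · injection hEq with h1 h2
      subst h1; subst h2
      rw [ihr (pre ++ ['1']) _ k' hnd.2.1 hm]
      simp
      omega
theorem pv_W_eq (w : String → Int) (t : PvHNode) :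
    pvW w t = ((pvLeavesD t).map (fun p => w p.1)).sum := by
  induction t with
  | leaf c f => simp [pvW, pvLeavesD]
  | node f l r ihl ihr =>
    simp only [pvW, pvLeavesD, List.map_append, List.map_map, List.sum_append, ihl, ihr]
    rfl

theorem pv_C_key (w : String → Int) (xs : List (String × Nat)) :
    ((xs.map (fun p : String × Nat => (p.1, p.2 + 1))).map
        (fun p : String × Nat => w p.1 * (p.2 : Int))).sum =
      (xs.map (fun p : String × Nat => w p.1 * (p.2 : Int))).sum
        + (xs.map (fun p : String × Nat => w p.1)).sum := by
  induction xs with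
  | nil => simp
  | cons p xs ih =>
    simp only [List.map_cons, List.sum_cons]
    rw [ih]
    push_cast
    ring

theorem pv_C_eq (w : String → Int) (t : PvHNode) :
    pvC w t = ((pvLeavesD t).map (fun p => w p.1 * (p.2 : Int))).sum := by
  induction t with
  | leaf c f => simp [pvC, pvLeavesD]
  | node f l r ihl ihr =>
    rw [pvC, pvLeavesD, List.map_append, List.sum_append, ihl, ihr,
      pv_W_eq w l, pv_W_eq w r, pv_C_key, pv_C_key]
    ring
theorem pv_sum_count_dedup (lb : List String) (f : String → Int) :
    ((PySem.Set.ofList lb).map (fun k => (lb.count k : Int) * f k)).sum = (lb.map f).sum := by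
  have hfin : (PySem.Set.ofList lb).toFinset = lb.toFinset := by
    ext x; simp [PySem.Set.mem_ofList]
  have hnd := PySem.Set.nodup_ofList (xs := lb)
  rw [← List.sum_toFinset _ hnd, hfin, Finset.sum_list_map_count]
  refine Finset.sum_congr rfl (fun x _ => ?_)
  simp

theorem pv_sum_extend (l1 l2 : List String) (g : String → Int) (h1 : l1.Nodup) (h2 : l2.Nodup)
    (hsub : ∀ c ∈ l1, c ∈ l2) (hz : ∀ c ∈ l2, c ∉ l1 → g c = 0) :
    (l1.map g).sum = (l2.map g).sum := by
  rw [← List.sum_toFinset _ h1, ← List.sum_toFinset _ h2]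
  exact Finset.sum_subset (fun x hx => by
      simp only [List.mem_toFinset] at *; exact hsub x hx)
    (fun x hx hnx => hz x (by simpa using hx) (by simpa using hnx))

theorem pv_A_sum_eq_C (t : PvHNode) (lb : List String) (hnd : (pvLeaves t).Nodup)
    (hcov : ∀ bg ∈ lb, bg ∈ pvLeaves t) :
    (lb.map (fun bg =>
        (((pvBuildHuffmanCodes t [] PySem.Dict.empty).getD bg []).length : Int))).sum =
      pvC (fun c => (PySem.Dict.counter lb).getD c 0) t := by
  have hf : ∀ c k, (c, k) ∈ pvLeavesD t →
      (((pvBuildHuffmanCodes t [] PySem.Dict.empty).getD c []).length : Int) = (k : Int) := by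
    intro c k hm
    have := pv_codes_len t [] PySem.Dict.empty c k hnd hm
    simp at this
    exact_mod_cast this
  have hstep1 : pvC (fun c => (PySem.Dict.counter lb).getD c 0) t =
      ((pvLeaves t).map (fun c => (lb.count c : Int) *
        (((pvBuildHuffmanCodes t [] PySem.Dict.empty).getD c []).length : Int))).sum := by
    rw [pv_C_eq]
    have hcongr : (pvLeavesD t).map
        (fun p => (fun c => (PySem.Dict.counter lb).getD c 0) p.1 * (p.2 : Int)) =
        (pvLeavesD t).map (fun p => (lb.count p.1 : Int) *
          (((pvBuildHuffmanCodes t [] PySem.Dict.empty).getD p.1 []).length : Int)) := by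
      apply List.map_congr_left
      intro p hp
      simp only [PySem.Dict.getD_counter]
      rw [hf p.1 p.2 hp]
    rw [hcongr]
    have hmm : (pvLeavesD t).map (fun p => (lb.count p.1 : Int) *
          (((pvBuildHuffmanCodes t [] PySem.Dict.empty).getD p.1 []).length : Int)) =
        ((pvLeavesD t).map Prod.fst).map (fun c => (lb.count c : Int) *
          (((pvBuildHuffmanCodes t [] PySem.Dict.empty).getD c []).length : Int)) := by
      rw [List.map_map]
      rfl
    rw [hmm, pv_leavesD_fst]
  rw [hstep1]
  rw [← pv_sum_count_dedup lb
    (fun bg => (((pvBuildHuffmanCodes t [] PySem.Dict.empty).getD bg []).length : Int))]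
  exact pv_sum_extend _ _ _ (PySem.Set.nodup_ofList lb) hnd
    (fun c hc => hcov c ((PySem.Set.mem_ofList lb c).mp hc))
    (fun c _ hcn => by
      have : lb.count c = 0 := List.count_eq_zero.mpr
        (fun h => hcn ((PySem.Set.mem_ofList lb c).mpr h))
      simp [this])
theorem pv_size_items (d : PySem.Dict String Int) : d.size = d.items.length := rfl

theorem pv_mem_keys_update (ps : List (String × Int)) (k : String) :
    k ∈ (PySem.Dict.update PySem.Dict.empty ps).keys ↔ k ∈ ps.map Prod.fst := by
  show k ∈ (ps.foldl (fun d p => d.insert p.1 p.2) PySem.Dict.empty).keys ↔ _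
  rw [show (fun (d : PySem.Dict String Int) (p : String × Int) => d.insert p.1 p.2) =
    fun d p => d.insert (Prod.fst p) ((fun x => Prod.snd x) p) from rfl]
  rw [PySem.Dict.keys_foldl_insert_key]
  simp [PySem.Set.mem_update, PySem.Dict.keys, PySem.Dict.empty]

-- the whole nonempty-dict case, with B's counts already rewritten to Dict.counter lb
theorem pv_core (d : PySem.Dict String Int) (lb : List String)
    (hd : d.size ≠ 0) (hndk : d.keys.Nodup) (hcov : ∀ bg ∈ lb, bg ∈ d.keys) :
    (match pvBuildHuffmanTree d with
      | none => (0 : Int)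
      | some tree => (lb.map (fun bg =>
          (((pvBuildHuffmanCodes tree [] PySem.Dict.empty).getD bg []).length : Int))).sum) =
      pvWMergeLoop
        (d.items.foldl (fun h p => pvWPush h (p.2, (PySem.Dict.counter lb).getD p.1 0)) #[]).size
        (d.items.foldl (fun h p => pvWPush h (p.2, (PySem.Dict.counter lb).getD p.1 0)) #[]) 0 := by
  set w : String → Int := fun c => (PySem.Dict.counter lb).getD c 0 with hw
  set heap0 : Array PvHNode :=
    d.items.foldl (fun h p => pvHeappush h (PvHNode.leaf p.1 p.2)) #[] with hheap0
  have hBheap : d.items.foldl (fun h p => pvWPush h (p.2, (PySem.Dict.counter lb).getD p.1 0)) #[] =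
      heap0.map (pvPhi w) := by
    rw [hheap0, pv_init_sim w d.items #[]]
    simp [hw]
  have hinitperm := pv_init_perm d.items #[]
  rw [← hheap0] at hinitperm
  simp only [List.nil_append] at hinitperm
  have hsz0 : heap0.size = d.items.length := by
    have := hinitperm.length_eq
    simpa using this
  have hpos : 0 < heap0.size := by
    rw [hsz0]; rw [pv_size_items] at hd; omega
  have hszF : (pvBuildLoop heap0.size heap0).size = 1 := pv_bl_size heap0.size heap0 hpos (by omega)
  obtain ⟨t, htF⟩ : ∃ t, (pvBuildLoop heap0.size heap0).toList = [t] := by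
    have : (pvBuildLoop heap0.size heap0).toList.length = 1 := by simpa using hszF
    cases hl : (pvBuildLoop heap0.size heap0).toList with
    | nil => rw [hl] at this; simp at this
    | cons a tl =>
      rw [hl] at this; simp at this
      exact ⟨a, by rw [this]⟩
  have htree : pvBuildHuffmanTree d = some t := by
    rw [pvBuildHuffmanTree]
    simp only [← hheap0]
    have : (pvBuildLoop heap0.size heap0)[0]? = some t := by
      rw [← Array.getElem?_toList, htF]
      rfl
    exact this
  -- leaves of t are exactly the dict keys (as a multiset)
  have hleaves : List.Perm (pvLeaves t) d.keys := by
    have hbl := pv_bl_leaves heap0.size heap0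
    rw [htF] at hbl
    simp only [List.flatMap_cons, List.flatMap_nil, List.append_nil] at hbl
    refine hbl.trans ?_
    refine (hinitperm.flatMap_right pvLeaves).trans ?_
    have : (d.items.map (fun p => PvHNode.leaf p.1 p.2)).flatMap pvLeaves =
        d.items.map Prod.fst := by
      rw [List.flatMap_map]
      simp only [pvLeaves]
      induction d.items with
      | nil => rfl
      | cons p ps ih => simp_all
    rw [this]
    exact List.Perm.refl _
  have hndl : (pvLeaves t).Nodup := (hleaves.nodup_iff).mpr hndk
  have hcovl : ∀ bg ∈ lb, bg ∈ pvLeaves t :=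
    fun bg h => (hleaves.mem_iff).mpr (hcov bg h)
  -- B's side via the simulation
  have hcs0 : pvCsum w heap0 = 0 := by
    unfold pvCsum
    rw [(hinitperm.map (pvC w)).sum_eq]
    rw [List.map_map]
    have : (pvC w ∘ fun p : String × Int => PvHNode.leaf p.1 p.2) = fun _ => (0 : Int) := by
      funext p; rfl
    rw [this]
    simp
  have hcsF : pvCsum w (pvBuildLoop heap0.size heap0) = pvC w t := by
    unfold pvCsum
    rw [htF]
    simp
  rw [hBheap, Array.size_map, pv_loop_sim w heap0.size heap0 0, hcs0, hcsF, htree]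
  dsimp only
  rw [hw, pv_A_sum_eq_C t lb hndl hcovl]
  ring

-- ===== VERDICT (by name: the statement is the Claim_ definition above) =====
theorem huffman_bigram_encoding_spec : Claim_equal_huffman_bigram_encoding := by
  intro text bigram_freq _ hpre
  unfold Spec_huffman_bigram_encoding huffman_bigram_encoding huffman_bigram_encoding_alt
  by_cases hd : (PySem.Dict.update (PySem.Dict.empty) bigram_freq).size = 0 <;>
    simp only [hd, if_true, if_false]
  set d := PySem.Dict.update (PySem.Dict.empty) bigram_freq with hdd
  set lb := (PySem.List.pyRange 0 (PySem.Str.len text - 1) 1).map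
    (fun i => PySem.Str.slice text (some i) (some (i + 2))) with hlb
  have hcounts : (PySem.List.pyRange 0 (PySem.Str.len text - 1) 1).foldl
      (fun c i =>
        let bg := PySem.Str.slice text (some i) (some (i + 2))
        c.insert bg (c.getD bg 0 + 1))
      (PySem.Dict.empty : PySem.Dict String Int) = PySem.Dict.counter lb := by
    rw [← PySem.Dict.foldl_insert_getD_add_one_eq_counter, hlb, List.foldl_map]
  have hndk : d.keys.Nodup := by
    rw [hdd]
    exact PySem.Dict.nodup_keys_update _ _ (by simp [PySem.Dict.keys, PySem.Dict.empty])
  have hcov : ∀ bg ∈ lb, bg ∈ d.keys := by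
    intro bg hbg
    rcases hpre with hnil | hmem
    · exfalso; apply hd; rw [hdd, hnil]; rfl
    · rw [hlb] at hbg
      obtain ⟨i, hi, hieq⟩ := List.mem_map.mp hbg
      rw [hdd]
      exact (pv_mem_keys_update bigram_freq bg).mpr (hieq ▸ hmem i hi)
  have hcore := pv_core d lb hd hndk hcov
  rw [hcounts]
  cases hmatch : pvBuildHuffmanTree d with
  | none =>
    rw [hmatch] at hcore
    dsimp only at hcore ⊢
    simpa using hcore
  | some t =>
    rw [hmatch] at hcore
    dsimp only at hcore ⊢
    rw [PySem.List.foldl_add]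
    simpa using hcore
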